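-- pv_equiv track=rewrite | github.com/BrandonLeeDotDev/handle-this | scripts/generate_full_matrix.py | build_cf_nested_try
-- ===== SOURCE A (Python) =====
-- from typing import List, Dict, Optional, Tuple, Iterator, Set
--
-- def build_cf_nested_try(depth: int, error_cond: str, inner_handler: str, outer_handlers: List[str] = None) -> str:
--     """Build nested try blocks with control flow handlers.
--
--     Args:
--         depth: Nesting depth (1-3)
--         error_cond: Condition that triggers the error
--         inner_handler: Handler for the innermost try
--         outer_handlers: Handlers for outer try levels (optional)
--     """
--     if outer_handlers is None:
--         outer_handlers = []
--
--     body = f"if {error_cond} {{ Err(io::Error::other(\"err\"))? }} 42"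
--
--     # Build from inside out
--     for i in range(depth):
--         handler = inner_handler if i == 0 else (outer_handlers[i-1] if i-1 < len(outer_handlers) else "")
--         body = f"try {{ {body} }} {handler}"
--
--     return body
-- ===== SOURCE B (Python) =====
-- def build_cf_nested_try(depth: int, error_cond: str, inner_handler: str, outer_handlers=None) -> str:
--     """One-pass assembly: prefix of 'try { ' openers, the inner body, then the
--     closing ' } <handler>' segments joined in order, instead of inside-out rewrapping."""
--     if outer_handlers is None:
--         outer_handlers = []
--     handlers = [inner_handler if i == 0 else (outer_handlers[i - 1] if i - 1 < len(outer_handlers) else "")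
--                 for i in range(depth)]
--     body = f"if {error_cond} {{ Err(io::Error::other(\"err\"))? }} 42"
--     return "try { " * depth + body + "".join(" } " + h for h in handlers)
-- ===== Notes on version B (the rewrite author's own statement) =====
-- stated objective: faster
-- what changed: Replaces the inside-out rewrapping loop (each iteration re-copies the whole accumulated string) by a flat one-pass assembly: a replicated 'try { ' prefix, the fixed body, and the joined ' } <handler>' closing segments.
import Mathlib
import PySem

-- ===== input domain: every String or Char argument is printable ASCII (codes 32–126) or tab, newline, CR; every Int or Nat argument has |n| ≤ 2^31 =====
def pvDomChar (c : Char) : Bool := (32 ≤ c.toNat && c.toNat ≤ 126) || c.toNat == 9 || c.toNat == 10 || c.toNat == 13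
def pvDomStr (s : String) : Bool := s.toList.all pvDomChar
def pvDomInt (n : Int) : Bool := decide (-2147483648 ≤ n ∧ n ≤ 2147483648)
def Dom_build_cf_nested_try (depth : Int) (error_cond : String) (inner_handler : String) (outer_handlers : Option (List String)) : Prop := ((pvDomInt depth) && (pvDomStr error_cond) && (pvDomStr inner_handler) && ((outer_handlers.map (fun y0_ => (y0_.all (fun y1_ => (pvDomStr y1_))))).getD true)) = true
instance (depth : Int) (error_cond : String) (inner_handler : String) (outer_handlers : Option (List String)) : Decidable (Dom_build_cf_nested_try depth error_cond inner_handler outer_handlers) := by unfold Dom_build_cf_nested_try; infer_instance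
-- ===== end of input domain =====

-- B assembles the same string in one flat pass (prefix ++ body ++ joined closers) instead of A's inside-out rewrapping loop.

-- ===== PORT A =====
-- literal transliteration of A: fold over range(depth), rewrapping the body each iteration
def build_cf_nested_try (depth : Int) (error_cond : String) (inner_handler : String) (outer_handlers : Option (List String)) : String :=
  let outer := outer_handlers.getD []
  let body0 := "if " ++ error_cond ++ " { Err(io::Error::other(\"err\"))? } 42"
  (PySem.List.pyRange 0 depth 1).foldl
    (fun body i =>
      let handler := if i == 0 then inner_handler
        else if i - 1 < (outer.length : Int) then (PySem.List.pyGet? outer (i - 1)).getD "" else ""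
      "try { " ++ body ++ " } " ++ handler)
    body0

-- ===== PORT B =====
-- handler for level i (same conditional expression as Source B's comprehension)
def pvHandlerAt (inner : String) (outer : List String) (i : Int) : String :=
  if i == 0 then inner
  else if i - 1 < (outer.length : Int) then (PySem.List.pyGet? outer (i - 1)).getD "" else ""

-- literal transliteration of B: '"try { " * depth' is String.join of depth.toNat copies
-- (Python str*n is empty for n ≤ 0, matching Int.toNat); '"".join' is String.join
def build_cf_nested_try_alt (depth : Int) (error_cond : String) (inner_handler : String) (outer_handlers : Option (List String)) : String :=
  let outer := outer_handlers.getD []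
  let handlers := (PySem.List.pyRange 0 depth 1).map (pvHandlerAt inner_handler outer)
  let body := "if " ++ error_cond ++ " { Err(io::Error::other(\"err\"))? } 42"
  String.join (List.replicate depth.toNat "try { ") ++ body ++ String.join (handlers.map (fun h => " } " ++ h))

-- ===== PRECONDITION & SPEC =====
def Spec_build_cf_nested_try (depth : Int) (error_cond : String) (inner_handler : String) (outer_handlers : Option (List String)) (out : String) : Prop := out = build_cf_nested_try_alt depth error_cond inner_handler outer_handlers
instance (depth : Int) (error_cond : String) (inner_handler : String) (outer_handlers : Option (List String)) (out : String) : Decidable (Spec_build_cf_nested_try depth error_cond inner_handler outer_handlers out) := by unfold Spec_build_cf_nested_try; infer_instance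

-- ===== CLAIM (what is proved, stated in full; the proofs are below) =====
def Claim_equal_build_cf_nested_try : Prop := ∀ (depth : Int) (error_cond : String) (inner_handler : String) (outer_handlers : Option (List String)), Dom_build_cf_nested_try depth error_cond inner_handler outer_handlers → Spec_build_cf_nested_try depth error_cond inner_handler outer_handlers (build_cf_nested_try depth error_cond inner_handler outer_handlers)

-- ===== LEMMAS AND PROOFS =====

-- String.join is a fold with (++); these two lemmas let it split at cons/append
theorem pv_foldl_append (l : List String) (a b : String) :
    l.foldl (· ++ ·) (a ++ b) = a ++ l.foldl (· ++ ·) b := by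
  induction l generalizing b with
  | nil => rfl
  | cons x xs ih => simpa [String.append_assoc] using ih (b ++ x)

theorem pv_join_cons (x : String) (l : List String) :
    String.join (x :: l) = x ++ String.join l := by
  show List.foldl (· ++ ·) ("" ++ x) l = x ++ List.foldl (· ++ ·) "" l
  calc List.foldl (· ++ ·) ("" ++ x) l = List.foldl (· ++ ·) (x ++ "") l := by simp
    _ = x ++ List.foldl (· ++ ·) "" l := pv_foldl_append l x ""

theorem pv_join_append (l₁ l₂ : List String) :
    String.join (l₁ ++ l₂) = String.join l₁ ++ String.join l₂ := by
  induction l₁ with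
  | nil => simp [String.join]
  | cons x xs ih => simp [pv_join_cons, ih, String.append_assoc]

-- the core identity: A's rewrapping fold over range(0,n) equals prefix ++ b ++ joined closers
theorem pv_fold_eq_flat (h : Int → String) (b : String) : ∀ (n : Nat),
    (PySem.List.pyRange 0 n 1).foldl (fun body i => "try { " ++ body ++ " } " ++ h i) b
      = String.join (List.replicate n "try { ") ++ b
        ++ String.join (((PySem.List.pyRange 0 n 1).map h).map (fun s => " } " ++ s)) := by
  intro n
  induction n with
  | zero => simp [PySem.List.pyRange_one_eq_nil, String.join]
  | succ k ih =>
    have hsplit : PySem.List.pyRange 0 ((k : Int) + 1) 1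
        = PySem.List.pyRange 0 (k : Int) 1 ++ [(k : Int)] :=
      PySem.List.pyRange_one_succ_right (by positivity)
    push_cast
    rw [hsplit, List.foldl_append, ih]
    simp only [List.foldl_cons, List.foldl_nil, List.map_append, List.map_cons, List.map_nil,
      List.replicate_succ, pv_join_cons, pv_join_append]
    simp [String.join, String.append_assoc]

theorem build_cf_nested_try_spec : Claim_equal_build_cf_nested_try := by
  intro depth error_cond inner_handler outer_handlers _
  unfold Spec_build_cf_nested_try build_cf_nested_try build_cf_nested_try_alt
  by_cases hd : depth ≤ 0
  · simp [PySem.List.pyRange_one_eq_nil hd, Int.toNat_of_nonpos hd, String.join]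
  · have h0 : depth = ((depth.toNat : Nat) : Int) := (Int.toNat_of_nonneg (by omega)).symm
    rw [h0]
    exact pv_fold_eq_flat (pvHandlerAt inner_handler (outer_handlers.getD [])) _ depth.toNat
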